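-- pv_equiv track=rewrite | github.com/HristiyanPetkov/Test2 | calculate.py | calculate
-- ===== SOURCE A (Python) =====
-- def calculate(days):
--     payment = 200
--     money = 0
--     for i in range(0, days):
--         money += payment
--
--     if days > 14 and days <= 30:
--         for i in range(14, days):
--             money += 50
--     if days > 30 and days <= 60:
--         for i in range(30, days):
--             money += 80
--     if days > 60:
--         for i in range(60, days):
--             money += 100
--
--     return money
-- ===== SOURCE B (Python) =====
-- def calculate(days):
--     base = 200 * days if days > 0 else 0
--     if days <= 14:
--         bonus = 0
--     elif days <= 30:
--         bonus = 50 * (days - 14)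
--     elif days <= 60:
--         bonus = 80 * (days - 30)
--     else:
--         bonus = 100 * (days - 60)
--     return base + bonus
-- ===== Notes on version B (the rewrite author's own statement) =====
-- stated objective: faster
-- what changed: Replaced the per-day accumulation loops with closed-form arithmetic (loop count times increment per tier).
import Mathlib
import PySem

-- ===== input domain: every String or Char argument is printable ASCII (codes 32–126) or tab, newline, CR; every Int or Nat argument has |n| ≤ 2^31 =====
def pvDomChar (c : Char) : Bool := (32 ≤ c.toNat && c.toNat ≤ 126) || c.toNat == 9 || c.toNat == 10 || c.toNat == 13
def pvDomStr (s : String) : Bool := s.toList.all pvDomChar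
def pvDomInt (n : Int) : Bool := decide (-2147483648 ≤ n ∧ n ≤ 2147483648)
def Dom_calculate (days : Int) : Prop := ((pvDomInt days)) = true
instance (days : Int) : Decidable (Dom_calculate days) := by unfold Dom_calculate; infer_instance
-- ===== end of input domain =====

-- B replaces A's per-day loops with closed-form tier arithmetic: faster (O(1) vs O(days)).
-- ===== PORT A =====
def calculate (days : Int) : Int :=
  let money : Int := (PySem.List.pyRange 0 days 1).foldl (fun m _ => m + 200) 0
  let money : Int :=
    if days > 14 ∧ days ≤ 30 then (PySem.List.pyRange 14 days 1).foldl (fun m _ => m + 50) money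
    else money
  let money : Int :=
    if days > 30 ∧ days ≤ 60 then (PySem.List.pyRange 30 days 1).foldl (fun m _ => m + 80) money
    else money
  let money : Int :=
    if days > 60 then (PySem.List.pyRange 60 days 1).foldl (fun m _ => m + 100) money
    else money
  money

-- ===== PORT B =====
def calculate_alt (days : Int) : Int :=
  let base : Int := if days > 0 then 200 * days else 0
  let bonus : Int :=
    if days ≤ 14 then 0
    else if days ≤ 30 then 50 * (days - 14)
    else if days ≤ 60 then 80 * (days - 30)
    else 100 * (days - 60)
  base + bonus

-- ===== PRECONDITION & SPEC =====
def Spec_calculate (days : Int) (out : Int) : Prop := out = calculate_alt days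
instance (days : Int) (out : Int) : Decidable (Spec_calculate days out) := by unfold Spec_calculate; infer_instance

-- ===== CLAIM (what is proved, stated in full; the proofs are below) =====
def Claim_equal_calculate : Prop := ∀ (days : Int), Dom_calculate days → Spec_calculate days (calculate days)

-- ===== LEMMAS AND PROOFS =====
theorem foldl_add_const (c : Int) (l : List Int) (init : Int) :
    l.foldl (fun m _ => m + c) init = init + c * l.length := by
  induction l generalizing init with
  | nil => simp
  | cons x xs ih => simp [List.foldl, ih]; ring

theorem calculate_closed (days : Int) :
    calculate days =
      (0 + 200 * ((days - 0).toNat : Int))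
      + (if days > 14 ∧ days ≤ 30 then 50 * ((days - 14).toNat : Int) else 0)
      + (if days > 30 ∧ days ≤ 60 then 80 * ((days - 30).toNat : Int) else 0)
      + (if days > 60 then 100 * ((days - 60).toNat : Int) else 0) := by
  unfold calculate
  simp only [foldl_add_const, PySem.List.length_pyRange_one]
  split_ifs <;> push_cast <;> ring

-- ===== VERDICT (by name: the statement is the Claim_ definition above) =====
theorem calculate_spec : Claim_equal_calculate := by
  intro days _
  show calculate days = calculate_alt days
  rw [calculate_closed]
  simp only [calculate_alt]
  split_ifs <;> omega
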